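-- pv_equiv track=rewrite | github.com/JCake/PythonAdventOfCode2025 | adventOfCode/day11.py | paths_to
-- ===== SOURCE A (Python) =====
-- def paths_to(point: str, device_connections, goal:str, exclude = []) -> int:
--     if point in exclude:
--         return 0
--     if point == goal:
--         return 1
--     if not point in device_connections:
--         return 0
--     paths = 0
--     for next_point in device_connections[point]:
--         paths += paths_to(next_point, device_connections, goal)
--     return paths
-- ===== SOURCE B (Python) =====
-- def paths_to(point: str, device_connections, goal: str, exclude=[]) -> int:
--     # Memoized DFS: each node's path count is computed once (DP over the DAG);
--     # exclude is consulted only at entry, matching A's recursive calls that drop it.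
--     if point in exclude:
--         return 0
--     memo = {}
--
--     def count(p):
--         if p == goal:
--             return 1
--         if p not in device_connections:
--             return 0
--         if p in memo:
--             return memo[p]
--         total = 0
--         for q in device_connections[p]:
--             total += count(q)
--         memo[p] = total
--         return total
--
--     return count(point)
-- ===== Notes on version B (the rewrite author's own statement) =====
-- stated objective: alternative
-- what changed: Replaced the plain tree recursion by a memoized DFS (a dict of per-node path counts computed once, DP over the DAG), with the exclude list consulted only at entry, exactly as A's recursive calls drop it.
import Mathlib
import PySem

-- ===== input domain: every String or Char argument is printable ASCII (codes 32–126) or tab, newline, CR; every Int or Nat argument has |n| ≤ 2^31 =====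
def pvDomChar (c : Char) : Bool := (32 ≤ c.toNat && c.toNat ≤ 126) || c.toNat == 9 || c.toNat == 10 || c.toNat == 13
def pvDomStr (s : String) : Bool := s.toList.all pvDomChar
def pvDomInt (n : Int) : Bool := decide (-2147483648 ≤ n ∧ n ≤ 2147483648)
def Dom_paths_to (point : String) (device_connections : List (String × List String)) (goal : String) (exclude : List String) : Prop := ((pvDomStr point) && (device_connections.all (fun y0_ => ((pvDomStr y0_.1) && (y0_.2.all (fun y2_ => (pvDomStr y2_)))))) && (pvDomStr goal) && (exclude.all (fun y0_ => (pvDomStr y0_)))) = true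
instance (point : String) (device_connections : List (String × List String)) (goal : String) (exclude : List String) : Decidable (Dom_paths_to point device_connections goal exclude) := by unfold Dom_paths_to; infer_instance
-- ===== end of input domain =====

-- B replaces A's plain tree recursion by a memoized DFS (each node's count is
-- computed once); A = B is proved on Pre_, which excludes exactly the graphs with a
-- cycle reachable from `point` (goal-cut), where the Python A raises RecursionError.


-- ===== PORT A =====
-- A is general recursion on the graph; it is ported with a fuel parameter, fuel
-- d.length + 1, which is exact on Pre_: there every recursion chain passes through
-- distinct non-goal keys, so its depth is at most d.length + 1.
-- Recursive calls pass exclude = [] (Python's default), exactly as A does.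
def pathsToFuel (d : List (String × List String)) (goal : String) : Nat → String → List String → Int
  | 0, _, _ => 0
  | n + 1, point, exclude =>
    if exclude.contains point then 0
    else if point == goal then 1
    else match d.lookup point with
      | none => 0
      | some ns => ns.foldl (fun acc q => acc + pathsToFuel d goal n q []) 0

def paths_to (point : String) (device_connections : List (String × List String)) (goal : String) (exclude : List String) : Int :=
  pathsToFuel device_connections goal (device_connections.length + 1) point exclude

-- ===== PORT B =====
-- the inner `count` of Source B, with the memo dict threaded through; same fuel
-- d.length + 1, exact on Pre_ (memoized recursion is never deeper than A's).
def pvCount (d : List (String × List String)) (goal : String) : Nat → String → PySem.Dict String Int → Int × PySem.Dict String Int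
  | 0, _, memo => (0, memo)
  | fuel + 1, p, memo =>
    if p == goal then (1, memo)
    else match d.lookup p with
      | none => (0, memo)
      | some ns =>
        match memo.get? p with
        | some v => (v, memo)
        | none =>
          let r := ns.foldl (fun (acc : Int × PySem.Dict String Int) q =>
            let t := pvCount d goal fuel q acc.2
            (acc.1 + t.1, t.2)) (0, memo)
          (r.1, r.2.insert p r.1)

def paths_to_alt (point : String) (device_connections : List (String × List String)) (goal : String) (exclude : List String) : Int :=
  if exclude.contains point then 0
  else (pvCount device_connections goal (device_connections.length + 1) point PySem.Dict.empty).1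

-- ===== PRECONDITION & SPEC =====
-- one recursion step of A: no successors at the goal (A returns there), else the dict row
def pvStep (d : List (String × List String)) (goal : String) (p : String) : List String :=
  if p == goal then [] else (d.lookup p).getD []
-- all graph nodes; one grow step of a reachable set; its saturation
def pvUniv (d : List (String × List String)) : Finset String :=
  (d.flatMap (fun kv => kv.1 :: kv.2)).toFinset
def pvGrow (d : List (String × List String)) (goal : String) (S : Finset String) : Finset String :=
  S ∪ S.biUnion (fun p => (pvStep d goal p).toFinset)
def pvClosure (d : List (String × List String)) (goal : String) (S : Finset String) : Finset String :=
  (pvGrow d goal)^[(pvUniv d ∪ S).card] S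

-- Pre_ excludes exactly the inputs on which the Python A recurses forever
-- (RecursionError): point not excluded and some node reachable from point lying on a
-- cycle of A's recursion step (edges of the dict, cut at the goal).
def Pre_paths_to (point : String) (device_connections : List (String × List String)) (goal : String) (exclude : List String) : Prop :=
  exclude.contains point = true ∨
    ∀ k ∈ pvClosure device_connections goal {point},
      k ∉ pvClosure device_connections goal (pvStep device_connections goal k).toFinset
instance (point : String) (device_connections : List (String × List String)) (goal : String) (exclude : List String) : Decidable (Pre_paths_to point device_connections goal exclude) := by unfold Pre_paths_to; infer_instance

def pvWitness_paths_to : String × (List (String × List String)) × String × List String :=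
  ("a", [("a", ["b", "b"]), ("b", ["c"])], "c", ["d"])

def Spec_paths_to (point : String) (device_connections : List (String × List String)) (goal : String) (exclude : List String) (out : Int) : Prop := out = paths_to_alt point device_connections goal exclude
instance (point : String) (device_connections : List (String × List String)) (goal : String) (exclude : List String) (out : Int) : Decidable (Spec_paths_to point device_connections goal exclude out) := by unfold Spec_paths_to; infer_instance

-- ===== CLAIM (what is proved, stated in full; the proofs are below) =====
def Claim_equal_paths_to : Prop := ∀ (point : String) (device_connections : List (String × List String)) (goal : String) (exclude : List String), Dom_paths_to point device_connections goal exclude → Pre_paths_to point device_connections goal exclude → Spec_paths_to point device_connections goal exclude (paths_to point device_connections goal exclude)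

-- ===== LEMMAS AND PROOFS =====

-- the step relation and reachability (ghost, proof-only)
def StepR (d : List (String × List String)) (goal : String) (x y : String) : Prop :=
  y ∈ pvStep d goal x
def Reach (d : List (String × List String)) (goal : String) : String → String → Prop :=
  Relation.ReflTransGen (StepR d goal)

theorem lookup_mem (d : List (String × List String)) (p : String) (ns : List String)
    (h : d.lookup p = some ns) : (p, ns) ∈ d := by
  induction d with
  | nil => simp [List.lookup] at h
  | cons kv rest ih =>
    by_cases hp : p = kv.1
    · subst hp
      simp [List.lookup] at h
      cases kv
      simp_all
    · have hb : (p == kv.1) = false := by simp [hp]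
      simp [List.lookup, hb] at h
      exact List.mem_cons_of_mem _ (ih h)

theorem step_subset_univ (d : List (String × List String)) (goal p q : String)
    (h : q ∈ pvStep d goal p) : q ∈ pvUniv d := by
  unfold pvStep at h
  by_cases hg : p = goal
  · simp [hg] at h
  · rw [if_neg (by simp [hg])] at h
    cases hl : d.lookup p with
    | none => rw [hl] at h; simp at h
    | some ns =>
      rw [hl] at h
      simp only [Option.getD_some] at h
      have hm := lookup_mem d p ns hl
      unfold pvUniv
      rw [List.mem_toFinset, List.mem_flatMap]
      exact ⟨(p, ns), hm, List.mem_cons_of_mem _ h⟩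

theorem grow_in_univ (d : List (String × List String)) (goal : String) (S U : Finset String)
    (hSU : S ⊆ U) (hU : pvUniv d ⊆ U) : pvGrow d goal S ⊆ U := by
  unfold pvGrow
  intro x hx
  rcases Finset.mem_union.1 hx with h | h
  · exact hSU h
  · rcases Finset.mem_biUnion.1 h with ⟨p, _, hp⟩
    exact hU (step_subset_univ d goal p x (List.mem_toFinset.1 hp))

theorem subset_iterate (F : Finset String → Finset String) (hincl : ∀ T, T ⊆ F T) :
    ∀ (n : Nat) (S : Finset String), S ⊆ F^[n] S := by
  intro n
  induction n with
  | zero => intro S; simp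
  | succ n ih =>
    intro S
    rw [Function.iterate_succ_apply]
    exact (hincl S).trans (ih (F S))

-- enough iterations of an inflationary map inside a finite universe reach a fixed point
theorem iterate_fixed_of_card (F : Finset String → Finset String) (hincl : ∀ T, T ⊆ F T) :
    ∀ (n : Nat) (S U : Finset String), S ⊆ U → (∀ T, T ⊆ U → F T ⊆ U) →
      U.card ≤ S.card + n → F (F^[n] S) = F^[n] S := by
  intro n
  induction n with
  | zero =>
    intro S U hSU hFU hc
    have : S = U := Finset.eq_of_subset_of_card_le hSU (by omega)
    subst this
    simp only [Function.iterate_zero, id]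
    exact Finset.Subset.antisymm (hFU S (le_refl S)) (hincl S)
  | succ n ih =>
    intro S U hSU hFU hc
    by_cases hfix : F S = S
    · rw [Function.iterate_fixed hfix, hfix]
    · have hss : S ⊂ F S := Finset.ssubset_iff_subset_ne.2 ⟨hincl S, fun h => hfix h.symm⟩
      have hcard := Finset.card_lt_card hss
      rw [Function.iterate_succ_apply]
      exact ih (F S) U (hFU S hSU) hFU (by omega)

theorem closure_contains (d : List (String × List String)) (goal : String) (S : Finset String) :
    S ⊆ pvClosure d goal S :=
  subset_iterate (pvGrow d goal) (fun T => Finset.subset_union_left) _ S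

theorem closure_fixed (d : List (String × List String)) (goal : String) (S : Finset String) :
    pvGrow d goal (pvClosure d goal S) = pvClosure d goal S := by
  unfold pvClosure
  exact iterate_fixed_of_card (pvGrow d goal) (fun T => Finset.subset_union_left)
    ((pvUniv d ∪ S).card) S (pvUniv d ∪ S) Finset.subset_union_right
    (fun T hT => grow_in_univ d goal T _ hT Finset.subset_union_left)
    (by omega)

theorem closure_closed (d : List (String × List String)) (goal : String) (S : Finset String)
    (k q : String) (hk : k ∈ pvClosure d goal S) (hq : q ∈ pvStep d goal k) :
    q ∈ pvClosure d goal S := by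
  rw [← closure_fixed d goal S]
  unfold pvGrow
  exact Finset.mem_union_right _ (Finset.mem_biUnion.2 ⟨k, hk, List.mem_toFinset.2 hq⟩)

theorem closure_complete (d : List (String × List String)) (goal : String) (S : Finset String)
    (x y : String) (hx : x ∈ S) (hr : Reach d goal x y) : y ∈ pvClosure d goal S := by
  induction hr with
  | refl => exact closure_contains d goal S hx
  | tail _ hstep ih => exact closure_closed d goal S _ _ ih hstep

-- Pre_'s second disjunct means: no cycle is reachable from point
theorem no_cycle_of_pre (d : List (String × List String)) (goal point : String)
    (hpre : ∀ k ∈ pvClosure d goal {point},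
      k ∉ pvClosure d goal (pvStep d goal k).toFinset) :
    ∀ k, Reach d goal point k → ¬ Relation.TransGen (StepR d goal) k k := by
  intro k hr hcyc
  have hk : k ∈ pvClosure d goal {point} :=
    closure_complete d goal {point} point k (Finset.mem_singleton_self point) hr
  rcases (Relation.TransGen.head'_iff).1 hcyc with ⟨m, hstep, hrest⟩
  exact hpre k hk (closure_complete d goal _ m k (List.mem_toFinset.2 hstep) hrest)

-- rank: number of non-goal keys reachable from p (ghost, proof-only)
noncomputable def pvRank (d : List (String × List String)) (goal p : String) : Nat :=
  ({k | k ∈ (d.map Prod.fst).toFinset ∧ k ≠ goal ∧ Reach d goal p k} : Set String).ncard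

theorem pvRank_set_finite (d : List (String × List String)) (goal p : String) :
    ({k | k ∈ (d.map Prod.fst).toFinset ∧ k ≠ goal ∧ Reach d goal p k} : Set String).Finite :=
  Set.Finite.subset ((d.map Prod.fst).toFinset.finite_toSet) (fun x hx => hx.1)

theorem step_of_lookup (d : List (String × List String)) (goal p : String) (ns : List String)
    (hg : p ≠ goal) (h : d.lookup p = some ns) (q : String) (hq : q ∈ ns) :
    StepR d goal p q := by
  unfold StepR pvStep
  rw [if_neg (by simp [hg]), h]
  exact hq

theorem pvRank_lt (d : List (String × List String)) (goal p : String) (ns : List String)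
    (hg : p ≠ goal) (h : d.lookup p = some ns)
    (hnc : ¬ Relation.TransGen (StepR d goal) p p) (q : String) (hq : q ∈ ns) :
    pvRank d goal q < pvRank d goal p := by
  have hstep := step_of_lookup d goal p ns hg h q hq
  apply Set.ncard_lt_ncard _ (pvRank_set_finite d goal p)
  constructor
  · intro k hk
    exact ⟨hk.1, hk.2.1, Relation.ReflTransGen.head hstep hk.2.2⟩
  · intro hsub
    have hp : p ∈ ({k | k ∈ (d.map Prod.fst).toFinset ∧ k ≠ goal ∧ Reach d goal p k} : Set String) :=
      ⟨List.mem_toFinset.2 (List.mem_map.2 ⟨(p, ns), lookup_mem d p ns h, rfl⟩), hg,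
        Relation.ReflTransGen.refl⟩
    have hpq := hsub hp
    exact hnc (Relation.TransGen.head' hstep hpq.2.2)

theorem pvRank_le (d : List (String × List String)) (goal p : String) :
    pvRank d goal p ≤ d.length := by
  unfold pvRank
  calc ({k | k ∈ (d.map Prod.fst).toFinset ∧ k ≠ goal ∧ Reach d goal p k} : Set String).ncard
      ≤ (↑(d.map Prod.fst).toFinset : Set String).ncard :=
        Set.ncard_le_ncard (fun x hx => hx.1) ((d.map Prod.fst).toFinset.finite_toSet)
    _ = (d.map Prod.fst).toFinset.card := Set.ncard_coe_finset _
    _ ≤ (d.map Prod.fst).length := (d.map Prod.fst).toFinset_card_le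
    _ = d.length := List.length_map _

theorem pvRank_pos (d : List (String × List String)) (goal p : String) (ns : List String)
    (hg : p ≠ goal) (h : d.lookup p = some ns) : 1 ≤ pvRank d goal p := by
  have hp : p ∈ ({k | k ∈ (d.map Prod.fst).toFinset ∧ k ≠ goal ∧ Reach d goal p k} : Set String) :=
    ⟨List.mem_toFinset.2 (List.mem_map.2 ⟨(p, ns), lookup_mem d p ns h, rfl⟩), hg,
      Relation.ReflTransGen.refl⟩
  exact (Set.ncard_pos (pvRank_set_finite d goal p)).2 ⟨p, hp⟩

theorem pathsToFuel_succ_nil (d : List (String × List String)) (goal : String) (n : Nat) (p : String) :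
    pathsToFuel d goal (n + 1) p []
      = if p == goal then 1 else
          match d.lookup p with
          | none => 0
          | some ns => ns.foldl (fun acc q => acc + pathsToFuel d goal n q []) 0 := by
  show (if List.contains [] p then _ else _) = _
  rw [List.contains_nil]
  simp only [Bool.false_eq_true, if_false]

theorem pathsToFuel_succ_notin (d : List (String × List String)) (goal : String) (n : Nat)
    (p : String) (ex : List String) (hex : ex.contains p = false) :
    pathsToFuel d goal (n + 1) p ex = pathsToFuel d goal (n + 1) p [] := by
  show (if ex.contains p then _ else _) = (if List.contains [] p then _ else _)
  rw [hex, List.contains_nil]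

theorem foldl_add_congr_mem (ns : List String) (f g : String → Int)
    (h : ∀ q ∈ ns, f q = g q) (a : Int) :
    ns.foldl (fun acc q => acc + f q) a = ns.foldl (fun acc q => acc + g q) a := by
  induction ns generalizing a with
  | nil => rfl
  | cons q ns ih =>
    simp only [List.foldl_cons]
    rw [h q (List.mem_cons_self), ih (fun x hx => h x (List.mem_cons_of_mem q hx))]

-- with no reachable cycle, the fueled value is stable once the fuel exceeds the rank
theorem pvStable (d : List (String × List String)) (goal point : String)
    (H : ∀ k, Reach d goal point k → ¬ Relation.TransGen (StepR d goal) k k) :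
    ∀ (n : Nat) (p : String) (f₁ f₂ : Nat), pvRank d goal p ≤ n → Reach d goal point p →
      n + 1 ≤ f₁ → n + 1 ≤ f₂ →
      pathsToFuel d goal f₁ p [] = pathsToFuel d goal f₂ p [] := by
  intro n
  induction n with
  | zero =>
    intro p f₁ f₂ hrk hr h1 h2
    obtain ⟨a, rfl⟩ : ∃ a, f₁ = a + 1 := ⟨f₁ - 1, by omega⟩
    obtain ⟨b, rfl⟩ : ∃ b, f₂ = b + 1 := ⟨f₂ - 1, by omega⟩
    rw [pathsToFuel_succ_nil, pathsToFuel_succ_nil]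
    by_cases hg : p = goal
    · simp [hg]
    · rw [if_neg (by simp [hg]), if_neg (by simp [hg])]
      cases hl : d.lookup p with
      | none => rfl
      | some ns => exact absurd (pvRank_pos d goal p ns hg hl) (by omega)
  | succ n ih =>
    intro p f₁ f₂ hrk hr h1 h2
    obtain ⟨a, rfl⟩ : ∃ a, f₁ = a + 1 := ⟨f₁ - 1, by omega⟩
    obtain ⟨b, rfl⟩ : ∃ b, f₂ = b + 1 := ⟨f₂ - 1, by omega⟩
    rw [pathsToFuel_succ_nil, pathsToFuel_succ_nil]
    by_cases hg : p = goal
    · simp [hg]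
    · rw [if_neg (by simp [hg]), if_neg (by simp [hg])]
      cases hl : d.lookup p with
      | none => rfl
      | some ns =>
        apply foldl_add_congr_mem
        intro q hq
        have hlt := pvRank_lt d goal p ns hg hl (H p hr) q hq
        exact ih q a b (by omega) (hr.tail (step_of_lookup d goal p ns hg hl q hq))
          (by omega) (by omega)

-- the reference value: A's fueled computation at the canonical fuel
def pvSpecV (d : List (String × List String)) (goal p : String) : Int :=
  pathsToFuel d goal (d.length + 1) p []

theorem specV_goal (d : List (String × List String)) (goal p : String) (hg : p = goal) :
    pvSpecV d goal p = 1 := by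
  unfold pvSpecV
  rw [pathsToFuel_succ_nil]
  simp [hg]

theorem specV_nonkey (d : List (String × List String)) (goal p : String) (hg : p ≠ goal)
    (h : d.lookup p = none) : pvSpecV d goal p = 0 := by
  unfold pvSpecV
  rw [pathsToFuel_succ_nil, if_neg (by simp [hg]), h]

theorem specV_key (d : List (String × List String)) (goal p : String) (ns : List String)
    (hg : p ≠ goal) (h : d.lookup p = some ns) :
    pvSpecV d goal p = ns.foldl (fun acc q => acc + pathsToFuel d goal d.length q []) 0 := by
  unfold pvSpecV
  rw [pathsToFuel_succ_nil, if_neg (by simp [hg]), h]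

theorem pvCount_succ (d : List (String × List String)) (goal : String) (fuel : Nat)
    (p : String) (memo : PySem.Dict String Int) :
    pvCount d goal (fuel + 1) p memo
      = if p == goal then (1, memo)
        else match d.lookup p with
          | none => (0, memo)
          | some ns =>
            match memo.get? p with
            | some v => (v, memo)
            | none =>
              let r := ns.foldl (fun (acc : Int × PySem.Dict String Int) q =>
                let t := pvCount d goal fuel q acc.2
                (acc.1 + t.1, t.2)) (0, memo)
              (r.1, r.2.insert p r.1) := rfl

-- soundness of the memoized DFS: it returns the reference value and keeps the memo correct
theorem pvCount_sound (d : List (String × List String)) (goal point : String)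
    (H : ∀ k, Reach d goal point k → ¬ Relation.TransGen (StepR d goal) k k) :
    ∀ (n : Nat) (p : String) (f : Nat) (memo : PySem.Dict String Int),
      pvRank d goal p ≤ n → Reach d goal point p → n + 1 ≤ f →
      (∀ k v, memo.get? k = some v → Reach d goal point k ∧ v = pvSpecV d goal k) →
      (pvCount d goal f p memo).1 = pvSpecV d goal p ∧
      (∀ k v, (pvCount d goal f p memo).2.get? k = some v →
        Reach d goal point k ∧ v = pvSpecV d goal k) := by
  intro n
  induction n with
  | zero =>
    intro p f memo hrk hr hf hm
    obtain ⟨m, rfl⟩ : ∃ m, f = m + 1 := ⟨f - 1, by omega⟩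
    by_cases hg : p = goal
    · rw [pvCount_succ, if_pos (by simp [hg] : (p == goal) = true)]
      exact ⟨(specV_goal d goal p hg).symm, hm⟩
    · rw [pvCount_succ, if_neg (by simp [hg] : ¬ (p == goal) = true)]
      cases hl : d.lookup p with
      | none => exact ⟨(specV_nonkey d goal p hg hl).symm, hm⟩
      | some ns => exact absurd (pvRank_pos d goal p ns hg hl) (by omega)
  | succ n ih =>
    intro p f memo hrk hr hf hm
    obtain ⟨m, rfl⟩ : ∃ m, f = m + 1 := ⟨f - 1, by omega⟩
    by_cases hg : p = goal
    · rw [pvCount_succ, if_pos (by simp [hg] : (p == goal) = true)]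
      exact ⟨(specV_goal d goal p hg).symm, hm⟩
    · rw [pvCount_succ, if_neg (by simp [hg] : ¬ (p == goal) = true)]
      cases hl : d.lookup p with
      | none => exact ⟨(specV_nonkey d goal p hg hl).symm, hm⟩
      | some ns =>
        have hnc := H p hr
        have hchild : ∀ q ∈ ns, pvRank d goal q ≤ n ∧ Reach d goal point q := by
          intro q hq
          exact ⟨by have := pvRank_lt d goal p ns hg hl hnc q hq; omega,
            hr.tail (step_of_lookup d goal p ns hg hl q hq)⟩
        cases hmp : memo.get? p with
        | some v => exact ⟨(hm p v hmp).2, hm⟩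
        | none =>
          have fold : ∀ (l : List String), (∀ q ∈ l, q ∈ ns) →
              ∀ (a : Int) (mm : PySem.Dict String Int),
              (∀ k v, mm.get? k = some v → Reach d goal point k ∧ v = pvSpecV d goal k) →
              (l.foldl (fun (acc : Int × PySem.Dict String Int) q =>
                  let t := pvCount d goal m q acc.2
                  (acc.1 + t.1, t.2)) (a, mm)).1
                = l.foldl (fun acc q => acc + pvSpecV d goal q) a ∧
              (∀ k v, (l.foldl (fun (acc : Int × PySem.Dict String Int) q =>
                  let t := pvCount d goal m q acc.2
                  (acc.1 + t.1, t.2)) (a, mm)).2.get? k = some v →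
                Reach d goal point k ∧ v = pvSpecV d goal k) := by
            intro l
            induction l with
            | nil => intro _ a mm hmm; exact ⟨rfl, hmm⟩
            | cons q l ihl =>
              intro hsub a mm hmm
              have hq := hsub q (List.mem_cons_self)
              have hstep := ih q m mm (hchild q hq).1 (hchild q hq).2 (by omega) hmm
              simp only [List.foldl_cons]
              rw [hstep.1]
              exact ihl (fun x hx => hsub x (List.mem_cons_of_mem q hx)) _ _ hstep.2
          have hfold := fold ns (fun _ hx => hx) 0 memo hm
          have hsum : (ns.foldl (fun (acc : Int × PySem.Dict String Int) q =>
                let t := pvCount d goal m q acc.2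
                (acc.1 + t.1, t.2)) (0, memo)).1 = pvSpecV d goal p := by
            rw [hfold.1, specV_key d goal p ns hg hl]
            apply (foldl_add_congr_mem ns _ _ _ 0).symm
            intro q hq
            exact pvStable d goal point H (pvRank d goal q) q d.length (d.length + 1)
              (le_refl _) (hchild q hq).2
              (by have h1 := pvRank_lt d goal p ns hg hl hnc q hq
                  have h2 := pvRank_le d goal p; omega)
              (by have := pvRank_le d goal q; omega)
          refine ⟨hsum, ?_⟩
          intro k v hk
          rw [PySem.Dict.get?_insert] at hk
          by_cases hkp : k = p
          · rw [if_pos hkp] at hk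
            cases hk
            exact ⟨hkp ▸ hr, hkp ▸ hsum⟩
          · rw [if_neg hkp] at hk
            exact hfold.2 k v hk

-- ===== VERDICT (by name: the statement is the Claim_ definition above) =====
theorem paths_to_spec : Claim_equal_paths_to := by
  intro point d goal exclude _ hpre
  unfold Spec_paths_to paths_to paths_to_alt
  cases hex : exclude.contains point with
  | true =>
    show (if exclude.contains point then (0 : Int) else _) = _
    rw [hex]
    simp
  | false =>
    simp only [Bool.false_eq_true, if_false]
    have hpre' : ∀ k ∈ pvClosure d goal {point},
        k ∉ pvClosure d goal (pvStep d goal k).toFinset := by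
      rcases hpre with h | h
      · rw [hex] at h; exact absurd h (by simp)
      · exact h
    have H := no_cycle_of_pre d goal point hpre'
    have hmain := pvCount_sound d goal point H d.length point (d.length + 1)
      PySem.Dict.empty (pvRank_le d goal point) Relation.ReflTransGen.refl (le_refl _)
      (by intro k v hk; rw [PySem.Dict.get?_empty] at hk; cases hk)
    rw [pathsToFuel_succ_notin d goal d.length point exclude hex]
    exact hmain.1.symm
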